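-- pv_equiv track=rewrite | github.com/aakashH242/remote-mcp-adapter | src/remote_mcp_adapter/app/runtime_request_helpers.py | resolve_server_id_for_path
-- ===== SOURCE A (Python) =====
-- def resolve_server_id_for_path(path: str, mount_path_to_server_id: dict[str, str]) -> str | None:
--     """Return the best matching server ID for path, or None.
--
--     Args:
--         path: Request URL path.
--         mount_path_to_server_id: Mapping of mount paths to server identifiers.
--
--     Returns:
--         Server ID for the most specific matching mount path, or None.
--     """
--     best_match: tuple[int, str] | None = None
--     for mount_path, server_id in mount_path_to_server_id.items():
--         is_exact_match = path == mount_path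
--         is_child_path_match = path.startswith(f"{mount_path}/")
--         if not (is_exact_match or is_child_path_match):
--             continue
--         candidate = (len(mount_path), server_id)
--         if best_match is None or candidate[0] > best_match[0]:
--             best_match = candidate
--     if best_match is None:
--         return None
--     return best_match[1]
-- ===== SOURCE B (Python) =====
-- def resolve_server_id_for_path(path: str, mount_path_to_server_id: dict[str, str]) -> str | None:
--     """Return the best matching server ID for path, or None.
--
--     Order the mount paths by descending length (most specific first) and
--     return the server id of the first one that matches; distinct mount
--     paths of equal length can never both match one path, so there is no
--     tie to resolve.
--     """
--     by_specificity = sorted(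
--         mount_path_to_server_id.items(),
--         key=lambda kv: len(kv[0]),
--         reverse=True,
--     )
--     for mount_path, server_id in by_specificity:
--         if path == mount_path or path.startswith(mount_path + "/"):
--             return server_id
--     return None
-- ===== Notes on version B (the rewrite author's own statement) =====
-- stated objective: alternative
-- what changed: Replaces A's running-max scan carrying a (length, server_id) best tuple with sort-items-by-descending-mount-path-length then return the first matching entry; correctness rests on the proved fact that two distinct matching mount paths cannot have equal length.
import Mathlib
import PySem

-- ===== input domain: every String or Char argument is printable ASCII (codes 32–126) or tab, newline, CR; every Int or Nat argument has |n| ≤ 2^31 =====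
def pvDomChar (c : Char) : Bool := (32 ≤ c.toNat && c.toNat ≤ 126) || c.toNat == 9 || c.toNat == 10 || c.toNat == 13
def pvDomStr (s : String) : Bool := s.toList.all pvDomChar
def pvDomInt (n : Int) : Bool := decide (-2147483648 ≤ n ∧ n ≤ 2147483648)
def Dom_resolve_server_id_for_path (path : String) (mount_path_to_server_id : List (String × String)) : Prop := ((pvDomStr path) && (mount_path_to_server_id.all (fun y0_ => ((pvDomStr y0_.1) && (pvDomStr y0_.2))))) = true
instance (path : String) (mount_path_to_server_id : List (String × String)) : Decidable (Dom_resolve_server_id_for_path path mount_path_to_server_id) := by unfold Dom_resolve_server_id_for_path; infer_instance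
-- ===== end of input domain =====

-- B replaces A's running-max scan by "sort mounts by descending length, take the first match";
-- alternative decomposition of the same cost (no speed claim); equivalence rests on the proved
-- fact that two distinct matching mount paths cannot have equal length.


-- ===== PORT A =====
-- `path.startswith(f"{mount_path}/")` is ported on the List Char side
-- (PySem.Chars.startswith on .toList, '/' appended as a list element) because Lean's own
-- String.append is kernel-opaque; this is exact.
def resolve_server_id_for_path (path : String) (mount_path_to_server_id : List (String × String)) : Option String :=
  let d := PySem.Dict.ofList mount_path_to_server_id
  let best : Option (Int × String) :=
    d.items.foldl
      (fun best kv =>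
        let is_exact_match := path == kv.1
        let is_child_path_match := PySem.Chars.startswith path.toList (kv.1.toList ++ ['/'])
        if !(is_exact_match || is_child_path_match) then best
        else
          let candidate : Int × String := (PySem.Str.len kv.1, kv.2)
          match best with
          | none => some candidate
          | some b => if candidate.1 > b.1 then some candidate else some b)
      none
  match best with
  | none => none
  | some b => some b.2

-- ===== PORT B =====
-- the for-loop with early return over the sorted items
def pvAltScan (path : String) : List (String × String) → Option String
  | [] => none
  | (mount_path, server_id) :: rest =>
    if path == mount_path || PySem.Chars.startswith path.toList (mount_path.toList ++ ['/']) then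
      some server_id
    else pvAltScan path rest

def resolve_server_id_for_path_alt (path : String) (mount_path_to_server_id : List (String × String)) : Option String :=
  let by_specificity :=
    PySem.List.sorted (PySem.Dict.ofList mount_path_to_server_id).items
      (fun kv => PySem.Str.len kv.1) true
  pvAltScan path by_specificity

-- ===== PRECONDITION & SPEC =====
def Spec_resolve_server_id_for_path (path : String) (mount_path_to_server_id : List (String × String)) (out : Option String) : Prop := out = resolve_server_id_for_path_alt path mount_path_to_server_id
instance (path : String) (mount_path_to_server_id : List (String × String)) (out : Option String) : Decidable (Spec_resolve_server_id_for_path path mount_path_to_server_id out) := by unfold Spec_resolve_server_id_for_path; infer_instance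

-- ===== CLAIM (what is proved, stated in full; the proofs are below) =====
def Claim_equal_resolve_server_id_for_path : Prop := ∀ (path : String) (mount_path_to_server_id : List (String × String)), Dom_resolve_server_id_for_path path mount_path_to_server_id → Spec_resolve_server_id_for_path path mount_path_to_server_id (resolve_server_id_for_path path mount_path_to_server_id)

-- ===== LEMMAS AND PROOFS =====

-- the common match test, and A's update step, as named functions for the proofs
def pvMatch (path mount : String) : Bool :=
  path == mount || PySem.Chars.startswith path.toList (mount.toList ++ ['/'])

def pvUpd (b : Option (Int × String)) (kv : String × String) : Option (Int × String) :=
  match b with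
  | none => some (PySem.Str.len kv.1, kv.2)
  | some bb => if PySem.Str.len kv.1 > bb.1 then some (PySem.Str.len kv.1, kv.2) else some bb

-- a matching mount path is a prefix of `path`; strictly shorter unless it is exact
theorem pvMatch_prefix (path mount : String) (h : pvMatch path mount = true) :
    mount.toList <+: path.toList ∧ (path ≠ mount → mount.toList.length < path.toList.length) := by
  unfold pvMatch at h
  rcases Bool.or_eq_true_iff.mp h with h | h
  · have : path = mount := by exact (beq_iff_eq).mp h
    subst this
    exact ⟨List.prefix_refl _, fun hne => absurd rfl hne⟩
  · have hp : (mount.toList ++ ['/']) <+: path.toList := (PySem.Chars.startswith_iff _ _).mp h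
    have hpre : mount.toList <+: path.toList := (List.prefix_append mount.toList ['/']).trans hp
    have hlen : (mount.toList ++ ['/']).length ≤ path.toList.length := hp.length_le
    simp only [List.length_append, List.length_singleton] at hlen
    exact ⟨hpre, fun _ => by omega⟩

-- NO TIES: two matching mount paths of equal length are the same string
theorem pvMatch_tie (path m m' : String) (hm : pvMatch path m = true) (hm' : pvMatch path m' = true)
    (hl : m.toList.length = m'.toList.length) : m = m' := by
  obtain ⟨hp, hs⟩ := pvMatch_prefix path m hm
  obtain ⟨hp', hs'⟩ := pvMatch_prefix path m' hm'
  by_cases he : path = m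
  · by_cases he' : path = m'
    · rw [← he, ← he']
    · exfalso; have := hs' he'; rw [← he] at hl; omega
  · by_cases he' : path = m'
    · exfalso; have := hs he; rw [← he'] at hl; omega
    · have : m.toList = m'.toList := by
        rw [List.prefix_iff_eq_take] at hp hp'
        rw [hp, hp', hl]
      exact String.toList_inj.mp this

-- with nodup keys, a key determines its value
theorem pvNodupSnd : ∀ {L : List (String × String)}, (L.map Prod.fst).Nodup →
    ∀ {m s s'}, (m, s) ∈ L → (m, s') ∈ L → s = s' := by
  intro L
  induction L with
  | nil => intro _ m s s' h; cases h
  | cons a t ih =>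
    intro hnd m s s' h1 h2
    simp only [List.map_cons, List.nodup_cons] at hnd
    rcases List.mem_cons.mp h1 with h1 | h1 <;> rcases List.mem_cons.mp h2 with h2 | h2
    · rw [← h1] at h2; exact ((Prod.mk.injEq _ _ _ _).mp h2.symm).2
    · exfalso; exact hnd.1 (by rw [← h1]; exact List.mem_map.mpr ⟨(m, s'), h2, rfl⟩)
    · exfalso; exact hnd.1 (by rw [← h2]; exact List.mem_map.mpr ⟨(m, s), h1, rfl⟩)
    · exact ih hnd.2 h1 h2

-- A's step is the if-then form of pvUpd guarded by pvMatch
theorem pvStep_eq (path : String) :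
    (fun (best : Option (Int × String)) (kv : String × String) =>
        let is_exact_match := path == kv.1
        let is_child_path_match := PySem.Chars.startswith path.toList (kv.1.toList ++ ['/'])
        if !(is_exact_match || is_child_path_match) then best
        else
          let candidate : Int × String := (PySem.Str.len kv.1, kv.2)
          match best with
          | none => some candidate
          | some b => if candidate.1 > b.1 then some candidate else some b)
      = fun best kv => if pvMatch path kv.1 then pvUpd best kv else best := by
  funext best kv
  simp only [pvMatch, pvUpd]
  cases h : (path == kv.1 || PySem.Chars.startswith path.toList (kv.1.toList ++ ['/'])) <;>
    cases best <;> simp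

-- invariant of A's fold over the filtered (matching) entries
theorem pvFoldA_spec : ∀ (M : List (String × String)) (acc : Option (Int × String)),
    (M.foldl pvUpd acc = none ↔ M = [] ∧ acc = none) ∧
    (∀ b, M.foldl pvUpd acc = some b →
      (acc = some b ∨ ∃ kv ∈ M, kv.2 = b.2 ∧ PySem.Str.len kv.1 = b.1) ∧
      (∀ kv ∈ M, PySem.Str.len kv.1 ≤ b.1) ∧
      (∀ a, acc = some a → a.1 ≤ b.1)) := by
  intro M
  induction M with
  | nil =>
    intro acc
    constructor
    · simp
    · intro b hb; simp at hb
      exact ⟨Or.inl (by rw [hb]), by simp, fun a ha => by rw [hb] at ha; cases ha; omega⟩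
  | cons kv t ih =>
    intro acc
    have hne : pvUpd acc kv ≠ none := by
      intro hc
      cases acc with
      | none => simp [pvUpd] at hc
      | some bb => simp only [pvUpd] at hc; split at hc <;> cases hc
    constructor
    · simp only [List.foldl_cons]
      constructor
      · intro h
        rcases ((ih (pvUpd acc kv)).1.mp h) with ⟨_, h2⟩
        exact absurd h2 hne
      · intro ⟨h, _⟩; cases h
    · intro b hb
      simp only [List.foldl_cons] at hb
      obtain ⟨hw, hmax, hacc⟩ := (ih (pvUpd acc kv)).2 b hb
      -- facts about the one step pvUpd acc kv
      have step : (pvUpd acc kv = some b → (acc = some b ∨ (kv.2 = b.2 ∧ PySem.Str.len kv.1 = b.1))) ∧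
          PySem.Str.len kv.1 ≤ b.1 ∧ (∀ a, acc = some a → a.1 ≤ b.1) := by
        cases acc with
        | none =>
          have h1 : pvUpd none kv = some (PySem.Str.len kv.1, kv.2) := rfl
          have h2 := hacc _ h1
          refine ⟨fun h => ?_, by simpa using h2, by simp⟩
          right; rw [h1] at h; cases h; exact ⟨rfl, rfl⟩
        | some bb =>
          by_cases hgt : PySem.Str.len kv.1 > bb.1
          · have h0 : pvUpd (some bb) kv = if PySem.Str.len kv.1 > bb.1 then some (PySem.Str.len kv.1, kv.2) else some bb := rfl
            have h1 : pvUpd (some bb) kv = some (PySem.Str.len kv.1, kv.2) := by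
              rw [h0, if_pos hgt]
            have h2 := hacc _ h1
            simp only at h2
            refine ⟨fun h => ?_, by omega, fun a ha => ?_⟩
            · rw [h1] at h; cases h; exact Or.inr ⟨rfl, rfl⟩
            · cases ha; omega
          · have h0 : pvUpd (some bb) kv = if PySem.Str.len kv.1 > bb.1 then some (PySem.Str.len kv.1, kv.2) else some bb := rfl
            have h1 : pvUpd (some bb) kv = some bb := by
              rw [h0, if_neg hgt]
            have h2 := hacc _ h1
            refine ⟨fun h => Or.inl (by rw [← h1, h]), by omega, fun a ha => by cases ha; exact h2⟩
      refine ⟨?_, ?_, step.2.2⟩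
      · rcases hw with hw | ⟨kv', hkv', h1, h2⟩
        · rcases step.1 hw with h | ⟨h1, h2⟩
          · exact Or.inl h
          · exact Or.inr ⟨kv, List.mem_cons_self, h1, h2⟩
        · exact Or.inr ⟨kv', List.mem_cons_of_mem _ hkv', h1, h2⟩
      · intro kv' hkv'
        rcases List.mem_cons.mp hkv' with h | h
        · rw [h]; exact step.2.1
        · exact hmax kv' h

-- B's scan over a descending-sorted list: none iff nothing matches; a hit is a matching
-- entry of maximal mount-path length
theorem pvAltScan_spec (path : String) : ∀ (S : List (String × String)),
    S.Pairwise (fun a b => PySem.Str.len b.1 ≤ PySem.Str.len a.1) →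
    (pvAltScan path S = none ↔ ∀ kv ∈ S, pvMatch path kv.1 = false) ∧
    (∀ s, pvAltScan path S = some s →
      ∃ kv ∈ S, pvMatch path kv.1 = true ∧ kv.2 = s ∧
        ∀ kv' ∈ S, pvMatch path kv'.1 = true → PySem.Str.len kv'.1 ≤ PySem.Str.len kv.1) := by
  intro S
  induction S with
  | nil => intro _; constructor <;> simp [pvAltScan]
  | cons kv t ih =>
    intro hpw
    rw [List.pairwise_cons] at hpw
    obtain ⟨hhead, htail⟩ := hpw
    obtain ⟨ih1, ih2⟩ := ih htail
    by_cases h : pvMatch path kv.1 = true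
    · have hscan : pvAltScan path (kv :: t) = some kv.2 := by
        obtain ⟨m, s⟩ := kv
        simp only [pvAltScan]
        rw [if_pos (by exact h)]
      constructor
      · rw [hscan]; constructor
        · intro hc; cases hc
        · intro hall; exact absurd h (by simp [hall kv List.mem_cons_self])
      · intro s hs
        rw [hscan] at hs; cases hs
        exact ⟨kv, List.mem_cons_self, h, rfl, fun kv' hkv' _ => by
          rcases List.mem_cons.mp hkv' with h' | h'
          · rw [h']
          · exact hhead kv' h'⟩
    · have hscan : pvAltScan path (kv :: t) = pvAltScan path t := by
        obtain ⟨m, s⟩ := kv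
        simp only [pvAltScan]
        rw [if_neg (by exact h)]
      rw [hscan]
      constructor
      · rw [ih1]
        constructor
        · intro hall kv' hkv'
          rcases List.mem_cons.mp hkv' with h' | h'
          · rw [h']; exact Bool.eq_false_iff.mpr h
          · exact hall kv' h'
        · intro hall kv' hkv'
          exact hall kv' (List.mem_cons_of_mem _ hkv')
      · intro s hs
        obtain ⟨kv', hkv', hm, hsnd, hmax⟩ := ih2 s hs
        exact ⟨kv', List.mem_cons_of_mem _ hkv', hm, hsnd, fun kv'' hkv'' hm'' => by
          rcases List.mem_cons.mp hkv'' with h'' | h''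
          · exact absurd hm'' (by rw [h'']; exact h)
          · exact hmax kv'' h'' hm''⟩

-- equal Str.len means equal toList length
theorem pvLen_inj (m m' : String) (h : PySem.Str.len m = PySem.Str.len m') :
    m.toList.length = m'.toList.length := by
  rw [PySem.Str.len_eq, PySem.Str.len_eq] at h; exact_mod_cast h

-- ===== VERDICT (by name: the statement is the Claim_ definition above) =====
theorem resolve_server_id_for_path_spec : Claim_equal_resolve_server_id_for_path := by
  intro path mps _
  unfold Spec_resolve_server_id_for_path resolve_server_id_for_path resolve_server_id_for_path_alt
  simp only []
  set L := (PySem.Dict.ofList mps).items with hL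
  rw [pvStep_eq path, ← List.foldl_filter]
  set M := L.filter (fun kv => pvMatch path kv.1) with hM
  set S := PySem.List.sorted L (fun kv => PySem.Str.len kv.1) true with hS
  have hSpw : S.Pairwise (fun a b => PySem.Str.len b.1 ≤ PySem.Str.len a.1) :=
    PySem.List.sorted_pairwise_rev L _
  have hSmem : ∀ kv, kv ∈ S ↔ kv ∈ L := fun kv => PySem.List.mem_sorted L _ true kv
  obtain ⟨hB1, hB2⟩ := pvAltScan_spec path S hSpw
  obtain ⟨hA1, hA2⟩ := pvFoldA_spec M none
  have hnd : (L.map Prod.fst).Nodup := by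
    have := PySem.Dict.nodup_keys_ofList (κ := String) (ν := String) mps
    simpa [PySem.Dict.keys] using this
  cases hbest : M.foldl pvUpd none with
  | none =>
    have hMnil : M = [] := (hA1.mp hbest).1
    have hnone : pvAltScan path S = none := by
      rw [hB1]
      intro kv hkv
      by_contra hc
      have hm : pvMatch path kv.1 = true := Bool.not_eq_false _ |>.mp hc
      have : kv ∈ M := List.mem_filter.mpr ⟨(hSmem kv).mp hkv, hm⟩
      rw [hMnil] at this; cases this
    rw [hnone]
  | some b =>
    obtain ⟨hw, hmax, _⟩ := hA2 b hbest
    rcases hw with hw | ⟨kv, hkvM, hsnd, hlen⟩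
    · cases hw
    have hkvL : kv ∈ L := (List.mem_filter.mp hkvM).1
    have hkvm : pvMatch path kv.1 = true := (List.mem_filter.mp hkvM).2
    have hkvS : kv ∈ S := (hSmem kv).mpr hkvL
    cases hscan : pvAltScan path S with
    | none =>
      exfalso
      have := (hB1.mp hscan) kv hkvS
      rw [hkvm] at this; cases this
    | some s =>
      obtain ⟨kv', hkv'S, hkv'm, hsnd', hmaxS⟩ := hB2 s hscan
      have hkv'L : kv' ∈ L := (hSmem kv').mp hkv'S
      have hkv'M : kv' ∈ M := List.mem_filter.mpr ⟨hkv'L, hkv'm⟩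
      have h1 : PySem.Str.len kv'.1 ≤ b.1 := hmax kv' hkv'M
      have h2 : PySem.Str.len kv.1 ≤ PySem.Str.len kv'.1 := hmaxS kv hkvS hkvm
      have hleq : PySem.Str.len kv.1 = PySem.Str.len kv'.1 := by omega
      have hkeq : kv.1 = kv'.1 := pvMatch_tie path kv.1 kv'.1 hkvm hkv'm (pvLen_inj _ _ hleq)
      have hveq : kv.2 = kv'.2 := by
        apply pvNodupSnd hnd (m := kv.1)
        · exact (by rwa [← Prod.mk.eta (p := kv)] at hkvL)
        · rw [hkeq]; rwa [← Prod.mk.eta (p := kv')] at hkv'L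
      simp only []
      rw [← hsnd, ← hsnd', hveq]
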